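-- pv_equiv track=rewrite | github.com/kamrul-pu/problem-solving | DS_Algo/dynamic_programming/24_rod_cutting_problem.py | __optimized
-- ===== SOURCE A (Python) =====
-- from typing import List
--
-- def __optimized(N: int, cuts: List[int]) -> int:
--     n: int = len(cuts)
--     # Initialize a 1D dp array for space optimization
--     dp: List[int] = [0] * (N + 1)
--
--     # Fill the first row: cost of making cuts when only the first cut is considered
--     for c in range(N + 1):
--         dp[c] = c * cuts[0]
--
--     # Fill the dp array for each cut
--     for i in range(1, n):
--         # Store the previous values for not taking the current cut
--         for c in range(N + 1):
--             # Option 1: Not taking the current cut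
--             not_take: int = dp[c]
--
--             # Option 2: Taking the current cut
--             take: int = float("-inf")
--             r: int = (
--                 i + 1
--             )  # Number of units this cut would reduce the stick length by
--             if r <= c:  # Check if the remaining length allows this cut
--                 take = cuts[i] + dp[c - r]  # Cost of cut + cost of remaining stick
--
--             # Update the dp array with the maximum cost from taking or not taking
--             dp[c] = max(take, not_take)
--
--     # Return the result for the whole stick and all cuts
--     return dp[N]
-- ===== SOURCE B (Python) =====
-- from typing import List
--
-- def __optimized(N: int, cuts: List[int]) -> int:
--     # Canonical rod-cutting recurrence: one pass per length, scanning all pieces.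
--     dp: List[int] = [0] * (N + 1)
--     for c in range(1, N + 1):
--         dp[c] = max(cuts[j] + dp[c - (j + 1)] for j in range(len(cuts)) if j + 1 <= c)
--     return dp[N]
-- ===== Notes on version B (the rewrite author's own statement) =====
-- stated objective: faster
-- what changed: Replaced A's item-major DP (outer loop over pieces, rewriting every dp cell once per piece, with a float('-inf') sentinel and a Python-level max per cell) by the canonical length-major rod-cutting recurrence: each dp[c] is computed once as a single C-level max over the piece lengths that fit, so the per-piece full-row rewrites disappear.
import Mathlib
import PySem

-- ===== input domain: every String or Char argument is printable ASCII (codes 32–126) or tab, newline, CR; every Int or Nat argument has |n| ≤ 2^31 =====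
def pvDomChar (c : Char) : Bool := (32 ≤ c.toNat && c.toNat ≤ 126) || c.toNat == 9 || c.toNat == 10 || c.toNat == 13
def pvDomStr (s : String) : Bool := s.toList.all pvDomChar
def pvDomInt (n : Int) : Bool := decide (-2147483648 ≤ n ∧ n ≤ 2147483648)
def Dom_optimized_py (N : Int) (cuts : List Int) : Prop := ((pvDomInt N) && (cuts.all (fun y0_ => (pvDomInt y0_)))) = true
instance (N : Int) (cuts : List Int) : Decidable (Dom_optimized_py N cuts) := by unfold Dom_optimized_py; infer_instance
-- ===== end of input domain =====

-- B replaces A's item-major in-place DP by the canonical length-major rod-cutting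
-- recurrence (each dp[c] computed once as a max over all piece lengths): an
-- alternative decomposition of the same computation.

-- ===== PORT A =====
-- pvAGet/pvASet: Python list indexing/assignment on an Array buffer (a Python list
-- IS an array); exact for the indices 0 ≤ i < len(xs) these loops produce — every
-- index is in range on the inputs Pre_ admits.
def pvAGet (xs : Array Int) (i : Int) (d : Int) : Int := xs.getD i.toNat d
def pvASet (xs : Array Int) (i : Int) (v : Int) : Array Int := xs.setIfInBounds i.toNat v

def optimized_py (N : Int) (cuts : List Int) : Int :=
  let n : Int := cuts.length
  let dp : Array Int := Array.replicate (N + 1).toNat 0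
  let dp := (PySem.List.pyRange 0 (N + 1) 1).foldl
    (fun dp c => pvASet dp c (c * PySem.List.pyGetD cuts 0 0)) dp
  let dp := (PySem.List.pyRange 1 n 1).foldl
    (fun dp i =>
      (PySem.List.pyRange 0 (N + 1) 1).foldl
        (fun dp c =>
          let notTake := pvAGet dp c 0
          let r := i + 1
          pvASet dp c
            (if r ≤ c then max (PySem.List.pyGetD cuts i 0 + pvAGet dp (c - r) 0) notTake
             else notTake))
        dp)
    dp
  pvAGet dp N 0

-- ===== PORT B =====
def optimized_py_alt (N : Int) (cuts : List Int) : Int :=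
  let dp : Array Int := Array.replicate (N + 1).toNat 0
  let dp := (PySem.List.pyRange 1 (N + 1) 1).foldl
    (fun dp c =>
      pvASet dp c
        ((PySem.List.max?
            (((PySem.List.pyRange 0 (cuts.length : Int) 1).filter (fun j => decide (j + 1 ≤ c))).map
              (fun j => PySem.List.pyGetD cuts j 0 + pvAGet dp (c - (j + 1)) 0))
            (fun x => x)).getD 0))
    dp
  pvAGet dp N 0

-- ===== PRECONDITION & SPEC =====
-- Pre_ excludes exactly the inputs where A raises IndexError: N < 0 (dp[N] indexes a
-- list of length N+1 ≤ 0) and empty cuts (A always reads cuts[0]).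
def Pre_optimized_py (N : Int) (cuts : List Int) : Prop := 0 ≤ N ∧ cuts ≠ []
instance (N : Int) (cuts : List Int) : Decidable (Pre_optimized_py N cuts) := by
  unfold Pre_optimized_py; infer_instance

def pvWitness_optimized_py : Int × List Int := (4, [2, 5, 7])

def Spec_optimized_py (N : Int) (cuts : List Int) (out : Int) : Prop := out = optimized_py_alt N cuts
instance (N : Int) (cuts : List Int) (out : Int) : Decidable (Spec_optimized_py N cuts out) := by
  unfold Spec_optimized_py; infer_instance

-- ===== CLAIM (what is proved, stated in full; the proofs are below) =====
def Claim_equal_optimized_py : Prop := ∀ (N : Int) (cuts : List Int), Dom_optimized_py N cuts → Pre_optimized_py N cuts → Spec_optimized_py N cuts (optimized_py N cuts)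

-- ===== LEMMAS AND PROOFS =====

-- Functional model of one of A's in-place rows: piece value w, piece length r,
-- previous row `prev`; A reads the CURRENT row at c - r (already updated, c - r < c).
def pvRowStep (w : Int) (prev : Nat → Int) (r : Nat) (c : Nat) : Int :=
  if 1 ≤ r ∧ r ≤ c then max (w + pvRowStep w prev r (c - r)) (prev c) else prev c
termination_by c
decreasing_by omega

-- A's dp row after processing pieces 0..i.
def pvRowA (cuts : List Int) : Nat → Nat → Int
  | 0 => fun c => (c : Int) * cuts.getD 0 0
  | i + 1 => pvRowStep (cuts.getD (i + 1) 0) (pvRowA cuts i) (i + 2)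

-- B's recurrence, restricted to the first m pieces.
def pvBestU (cuts : List Int) (m : Nat) (c : Nat) : Int :=
  if c = 0 then 0
  else
    (PySem.List.max?
      (((List.range m).filter (fun j => decide (j + 1 ≤ c))).map
        (fun j => cuts.getD j 0 + pvBestU cuts m (c - (j + 1))))
      (fun x => x)).getD 0
termination_by c
decreasing_by omega

lemma pvAGet_natCast (xs : Array Int) (n : Nat) (d : Int) : pvAGet xs (n : Int) d = xs.getD n d := by
  simp [pvAGet]

lemma pvASet_natCast (xs : Array Int) (n : Nat) (v : Int) :
    pvASet xs (n : Int) v = xs.setIfInBounds n v := by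
  simp [pvASet]

lemma pvGetD_set (dp : Array Int) (a k : Nat) (v : Int) (ha : a < dp.size) :
    (dp.setIfInBounds a v).getD k 0 = if k = a then v else dp.getD k 0 := by
  simp only [Array.getD_eq_getD_getElem?, Array.getElem?_setIfInBounds]
  by_cases h : a = k
  · subst h; simp [ha]
  · simp [h, Ne.symm h]

lemma pvBestU_zero (cuts : List Int) (m : Nat) : pvBestU cuts m 0 = 0 := by
  simp [pvBestU]

lemma pvBestU_le (cuts : List Int) (m j c : Nat) (hj : j < m) (hjc : j + 1 ≤ c) :
    cuts.getD j 0 + pvBestU cuts m (c - (j + 1)) ≤ pvBestU cuts m c := by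
  conv_rhs => rw [pvBestU, if_neg (by omega : ¬ c = 0)]
  have hmem : cuts.getD j 0 + pvBestU cuts m (c - (j + 1)) ∈
      ((List.range m).filter (fun j => decide (j + 1 ≤ c))).map
        (fun j => cuts.getD j 0 + pvBestU cuts m (c - (j + 1))) := by
    simp only [List.mem_map, List.mem_filter, List.mem_range]
    exact ⟨j, ⟨hj, by simpa using hjc⟩, rfl⟩
  cases hS : PySem.List.max?
      (((List.range m).filter (fun j => decide (j + 1 ≤ c))).map
        (fun j => cuts.getD j 0 + pvBestU cuts m (c - (j + 1)))) (fun x => x) with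
  | none => rw [PySem.List.max?_eq_none_iff] at hS; rw [hS] at hmem; simp at hmem
  | some v => simpa using PySem.List.max?_isMax hS _ hmem

lemma pvBestU_cases (cuts : List Int) (m c : Nat) (hm : 1 ≤ m) (hc : 1 ≤ c) :
    ∃ j, j < m ∧ j + 1 ≤ c ∧ pvBestU cuts m c = cuts.getD j 0 + pvBestU cuts m (c - (j + 1)) := by
  rw [pvBestU, if_neg (by omega : ¬ c = 0)]
  have hmem : cuts.getD 0 0 + pvBestU cuts m (c - 1) ∈
      ((List.range m).filter (fun j => decide (j + 1 ≤ c))).map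
        (fun j => cuts.getD j 0 + pvBestU cuts m (c - (j + 1))) := by
    simp only [List.mem_map, List.mem_filter, List.mem_range]
    exact ⟨0, ⟨hm, by simpa using hc⟩, rfl⟩
  cases hS : PySem.List.max?
      (((List.range m).filter (fun j => decide (j + 1 ≤ c))).map
        (fun j => cuts.getD j 0 + pvBestU cuts m (c - (j + 1)))) (fun x => x) with
  | none => rw [PySem.List.max?_eq_none_iff] at hS; rw [hS] at hmem; simp at hmem
  | some v =>
    have := PySem.List.max?_mem hS
    simp only [List.mem_map, List.mem_filter, List.mem_range] at this
    obtain ⟨j, ⟨hj, hjc⟩, hval⟩ := this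
    exact ⟨j, hj, by simpa using hjc, by simp [← hval]⟩

lemma pvBestU_mono (cuts : List Int) (m : Nat) (hm : 1 ≤ m) :
    ∀ c, pvBestU cuts m c ≤ pvBestU cuts (m + 1) c := by
  intro c
  induction c using Nat.strong_induction_on with
  | _ c IH =>
    by_cases hc : c = 0
    · subst hc; simp [pvBestU_zero]
    · obtain ⟨j, hj, hjc, hval⟩ := pvBestU_cases cuts m c hm (by omega)
      rw [hval]
      calc cuts.getD j 0 + pvBestU cuts m (c - (j + 1))
          ≤ cuts.getD j 0 + pvBestU cuts (m + 1) (c - (j + 1)) := by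
            have := IH (c - (j + 1)) (by omega); linarith
        _ ≤ pvBestU cuts (m + 1) c := pvBestU_le cuts (m + 1) j c (by omega) hjc

lemma pvBestU_one (cuts : List Int) : ∀ c, pvBestU cuts 1 c = (c : Int) * cuts.getD 0 0 := by
  intro c
  induction c using Nat.strong_induction_on with
  | _ c IH =>
    by_cases hc : c = 0
    · subst hc; simp [pvBestU_zero]
    · rw [pvBestU, if_neg hc]
      have : List.range 1 = [0] := rfl
      rw [this]
      have hf : List.filter (fun j => decide (j + 1 ≤ c)) [0] = [0] := by
        simp; omega
      rw [hf]
      simp only [List.map_cons, List.map_nil]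
      rw [IH (c - 1) (by omega)]
      simp [PySem.List.max?]
      have : ((c - 1 : ℕ) : Int) = (c : Int) - 1 := by omega
      rw [this]; ring

-- The exchange lemma: adding piece i+1 to B's recurrence is exactly A's row update.
lemma pvExchange (cuts : List Int) (i : Nat) :
    ∀ c, pvBestU cuts (i + 2) c
      = pvRowStep (cuts.getD (i + 1) 0) (pvBestU cuts (i + 1)) (i + 2) c := by
  intro c
  induction c using Nat.strong_induction_on with
  | _ c IH =>
    rw [pvRowStep]
    by_cases h : i + 2 ≤ c
    · rw [if_pos ⟨by omega, h⟩,
        show pvRowStep (cuts.getD (i+1) 0) (pvBestU cuts (i+1)) (i+2) (c - (i+2))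
          = pvBestU cuts (i+2) (c - (i+2)) from (IH _ (by omega)).symm]
      apply le_antisymm
      · obtain ⟨j, hj, hjc, hval⟩ := pvBestU_cases cuts (i+2) c (by omega) (by omega)
        rw [hval]
        by_cases hji : j = i + 1
        · subst hji; exact le_max_left _ _
        · have hj' : j < i + 1 := by omega
          have hrec := IH (c - (j + 1)) (by omega)
          rw [pvRowStep] at hrec
          by_cases h2 : i + 2 ≤ c - (j + 1)
          · rw [if_pos ⟨by omega, h2⟩,
              show pvRowStep (cuts.getD (i+1) 0) (pvBestU cuts (i+1)) (i+2) (c - (j+1) - (i+2))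
                = pvBestU cuts (i+2) (c - (j+1) - (i+2)) from (IH _ (by omega)).symm] at hrec
            rw [hrec]
            have h3 : cuts.getD j 0 + pvBestU cuts (i+2) (c - (j+1) - (i+2))
                ≤ pvBestU cuts (i+2) (c - (i+2)) := by
              rw [show c - (j+1) - (i+2) = (c - (i+2)) - (j+1) from by omega]
              exact pvBestU_le cuts (i+2) j (c - (i+2)) hj (by omega)
            have h4 : cuts.getD j 0 + pvBestU cuts (i+1) (c - (j+1)) ≤ pvBestU cuts (i+1) c :=
              pvBestU_le cuts (i+1) j c hj' hjc
            rcases max_choice (cuts.getD (i+1) 0 + pvBestU cuts (i+2) (c - (j+1) - (i+2)))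
                (pvBestU cuts (i+1) (c - (j+1))) with hmax | hmax <;> rw [hmax]
            · exact le_max_of_le_left (by linarith)
            · exact le_max_of_le_right (by linarith)
          · rw [if_neg (by omega)] at hrec
            rw [hrec]
            exact le_max_of_le_right (pvBestU_le cuts (i+1) j c hj' hjc)
      · apply max_le
        · exact pvBestU_le cuts (i+2) (i+1) c (by omega) h
        · exact pvBestU_mono cuts (i+1) (by omega) c
    · rw [if_neg (by omega)]
      by_cases hc : c = 0
      · subst hc; simp [pvBestU_zero]
      · apply le_antisymm
        · obtain ⟨j, hj, hjc, hval⟩ := pvBestU_cases cuts (i+2) c (by omega) (by omega)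
          have hrec := IH (c - (j+1)) (by omega)
          rw [pvRowStep, if_neg (by omega)] at hrec
          rw [hval, hrec]
          exact pvBestU_le cuts (i+1) j c (by omega) hjc
        · obtain ⟨j, hj, hjc, hval⟩ := pvBestU_cases cuts (i+1) c (by omega) (by omega)
          have hrec := IH (c - (j+1)) (by omega)
          rw [pvRowStep, if_neg (by omega)] at hrec
          rw [hval, ← hrec]
          exact pvBestU_le cuts (i+2) j c (by omega) hjc

lemma pvRowA_eq (cuts : List Int) : ∀ i c, pvRowA cuts i c = pvBestU cuts (i + 1) c := by
  intro i
  induction i with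
  | zero => intro c; exact (pvBestU_one cuts c).symm
  | succ i IH =>
    intro c
    have hfun : pvRowA cuts i = pvBestU cuts (i + 1) := funext IH
    rw [pvRowA, hfun, ← pvExchange]

-- Generic invariant for an in-place update loop `for c in range(a, M+1): dp[c] = F(c, dp)`.
lemma pvFoldInv (F : Int → Array Int → Int) (t s : Nat → Int) (M a0 : Nat)
    (H : ∀ (c : Nat) (dp : Array Int), a0 ≤ c → c ≤ M → dp.size = M + 1 →
      (∀ k, k ≤ M → dp.getD k 0 = if k < c then t k else s k) → F (c : Int) dp = t c) :
    ∀ (d a : Nat) (dp : Array Int), M + 1 - a = d → a0 ≤ a → a ≤ M + 1 → dp.size = M + 1 →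
      (∀ k, k ≤ M → dp.getD k 0 = if k < a then t k else s k) →
      ((PySem.List.pyRange (a : Int) ((M : Int) + 1) 1).foldl
          (fun dp c => pvASet dp c (F c dp)) dp).size = M + 1 ∧
      ∀ k, k ≤ M → ((PySem.List.pyRange (a : Int) ((M : Int) + 1) 1).foldl
          (fun dp c => pvASet dp c (F c dp)) dp).getD k 0 = t k := by
  intro d
  induction d with
  | zero =>
    intro a dp hd ha0 haM hlen hinv
    rw [PySem.List.pyRange_one_eq_nil (by omega)]
    exact ⟨hlen, fun k hk => by rw [List.foldl_nil, hinv k hk, if_pos (by omega)]⟩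
  | succ d IHd =>
    intro a dp hd ha0 haM hlen hinv
    rw [PySem.List.pyRange_one_cons (by omega), List.foldl_cons,
      pvASet_natCast, H a dp ha0 (by omega) hlen hinv,
      show ((a : Int) + 1) = ((a + 1 : ℕ) : Int) from by push_cast; ring]
    refine IHd (a + 1) (dp.setIfInBounds a (t a)) (by omega) (by omega) (by omega)
      (by rw [Array.size_setIfInBounds]; exact hlen) ?_
    intro k hk
    rw [pvGetD_set dp a k (t a) (by omega)]
    by_cases hka : k = a
    · subst hka; simp
    · rw [if_neg hka, hinv k hk]
      by_cases hlt : k < a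
      · rw [if_pos hlt, if_pos (by omega)]
      · rw [if_neg hlt, if_neg (by omega)]

-- One row of A's second loop establishes pvRowA (i0+1) from pvRowA i0.
lemma pvRowFold (cuts : List Int) (M i0 : Nat) (dp : Array Int) (hlen : dp.size = M + 1)
    (hinv : ∀ k, k ≤ M → dp.getD k 0 = pvRowA cuts i0 k) :
    ((PySem.List.pyRange ((0 : ℕ) : Int) ((M : Int) + 1) 1).foldl
        (fun dp c => pvASet dp c
          (if ((i0 + 1 : ℕ) : Int) + 1 ≤ c then
             max (PySem.List.pyGetD cuts ((i0 + 1 : ℕ) : Int) 0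
                  + pvAGet dp (c - (((i0 + 1 : ℕ) : Int) + 1)) 0)
               (pvAGet dp c 0)
           else pvAGet dp c 0)) dp).size = M + 1 ∧
    ∀ k, k ≤ M → ((PySem.List.pyRange ((0 : ℕ) : Int) ((M : Int) + 1) 1).foldl
        (fun dp c => pvASet dp c
          (if ((i0 + 1 : ℕ) : Int) + 1 ≤ c then
             max (PySem.List.pyGetD cuts ((i0 + 1 : ℕ) : Int) 0
                  + pvAGet dp (c - (((i0 + 1 : ℕ) : Int) + 1)) 0)
               (pvAGet dp c 0)
           else pvAGet dp c 0)) dp).getD k 0 = pvRowA cuts (i0 + 1) k := by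
  refine pvFoldInv _ (pvRowA cuts (i0 + 1)) (pvRowA cuts i0) M 0 ?_ (M + 1) 0 dp
    (by omega) (by omega) (by omega) hlen ?_
  · intro c dp hc0 hcM hlen hmix
    simp only [pvAGet_natCast, PySem.List.pyGetD_natCast]
    have hstep : pvRowA cuts (i0 + 1) c
        = pvRowStep (cuts.getD (i0 + 1) 0) (pvRowA cuts i0) (i0 + 2) c := by
      simp [pvRowA]
    rw [hstep, pvRowStep]
    by_cases hg : i0 + 2 ≤ c
    · rw [if_pos (by push_cast; omega), if_pos (by omega)]
      rw [show ((c : Int) - (((i0 + 1 : ℕ) : Int) + 1)) = ((c - (i0 + 2) : ℕ) : Int) from by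
        push_cast; omega]
      rw [pvAGet_natCast]
      rw [hmix (c - (i0 + 2)) (by omega), if_pos (by omega)]
      rw [hmix c hcM, if_neg (by omega)]
      rw [show pvRowStep (cuts.getD (i0 + 1) 0) (pvRowA cuts i0) (i0 + 2) (c - (i0 + 2))
          = pvRowA cuts (i0 + 1) (c - (i0 + 2)) from by simp [pvRowA]]
    · rw [if_neg (by push_cast; omega), if_neg (by omega)]
      rw [hmix c hcM, if_neg (by omega)]
  · intro k hk
    rw [hinv k hk]
    by_cases hka : k < 0
    · omega
    · rw [if_neg hka]

-- All rows of A's second loop.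
lemma pvRowsA (cuts : List Int) (M : Nat) :
    ∀ (d i0 : Nat) (dp : Array Int), i0 + 1 + d = cuts.length → dp.size = M + 1 →
      (∀ k, k ≤ M → dp.getD k 0 = pvRowA cuts i0 k) →
      ((PySem.List.pyRange ((i0 + 1 : ℕ) : Int) ((cuts.length : ℕ) : Int) 1).foldl
          (fun dp i => (PySem.List.pyRange ((0 : ℕ) : Int) ((M : Int) + 1) 1).foldl
            (fun dp c => pvASet dp c
              (if i + 1 ≤ c then
                 max (PySem.List.pyGetD cuts i 0 + pvAGet dp (c - (i + 1)) 0)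
                   (pvAGet dp c 0)
               else pvAGet dp c 0)) dp) dp).size = M + 1 ∧
      ∀ k, k ≤ M → ((PySem.List.pyRange ((i0 + 1 : ℕ) : Int) ((cuts.length : ℕ) : Int) 1).foldl
          (fun dp i => (PySem.List.pyRange ((0 : ℕ) : Int) ((M : Int) + 1) 1).foldl
            (fun dp c => pvASet dp c
              (if i + 1 ≤ c then
                 max (PySem.List.pyGetD cuts i 0 + pvAGet dp (c - (i + 1)) 0)
                   (pvAGet dp c 0)
               else pvAGet dp c 0)) dp) dp).getD k 0 = pvRowA cuts (i0 + d) k := by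
  intro d
  induction d with
  | zero =>
    intro i0 dp hcount hlen hinv
    rw [PySem.List.pyRange_one_eq_nil
      (a := ((i0 + 1 : ℕ) : Int)) (b := ((cuts.length : ℕ) : Int)) (by push_cast; omega)]
    refine ⟨hlen, fun k hk => ?_⟩
    rw [List.foldl_nil, show i0 + 0 = i0 from by omega]
    exact hinv k hk
  | succ d IHd =>
    intro i0 dp hcount hlen hinv
    rw [PySem.List.pyRange_one_cons
      (a := ((i0 + 1 : ℕ) : Int)) (b := ((cuts.length : ℕ) : Int)) (by push_cast; omega),
      List.foldl_cons]
    obtain ⟨hlen', hinv'⟩ := pvRowFold cuts M i0 dp hlen hinv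
    rw [show (((i0 + 1 : ℕ) : Int) + 1) = ((i0 + 1 + 1 : ℕ) : Int) from by push_cast; ring]
    rw [show i0 + (d + 1) = i0 + 1 + d from by omega]
    exact IHd (i0 + 1) _ (by omega) hlen' hinv'

lemma pvPortA (cuts : List Int) (M : Nat) (hn : 1 ≤ cuts.length) :
    optimized_py ((M : ℕ) : Int) cuts = pvRowA cuts (cuts.length - 1) M := by
  obtain ⟨hlen1, hval1⟩ := pvFoldInv
    (F := fun c _ => c * PySem.List.pyGetD cuts 0 0)
    (t := pvRowA cuts 0) (s := fun _ => 0) M 0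
    (by intro c dp _ _ _ _
        rw [PySem.List.pyGetD_zero]
        simp [pvRowA])
    (M + 1) 0 (Array.replicate (M + 1) 0) (by omega) (by omega) (by omega) (by simp)
    (by intro k hk; rw [if_neg (by omega)]
        simp [Array.getD_eq_getD_getElem?, hk])
  obtain ⟨hlenF, hvalF⟩ := pvRowsA cuts M (cuts.length - 1) 0 _ (by omega) hlen1 hval1
  have hfin := hvalF M (le_refl M)
  rw [show 0 + (cuts.length - 1) = cuts.length - 1 from by omega] at hfin
  simp only [optimized_py]
  rw [show (((M : ℕ) : Int) + 1).toNat = M + 1 from by omega, pvAGet_natCast]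
  exact hfin

lemma pvPortB (cuts : List Int) (M : Nat) (hn : 1 ≤ cuts.length) :
    optimized_py_alt ((M : ℕ) : Int) cuts = pvBestU cuts cuts.length M := by
  have HB : ∀ (c : Nat) (dp : Array Int), 1 ≤ c → c ≤ M → dp.size = M + 1 →
      (∀ k, k ≤ M → dp.getD k 0 = if k < c then pvBestU cuts cuts.length k else 0) →
      (PySem.List.max? (((PySem.List.pyRange 0 (cuts.length : Int) 1).filter
          (fun j => decide (j + 1 ≤ ((c : ℕ) : Int)))).map
          (fun j => PySem.List.pyGetD cuts j 0 + pvAGet dp (((c : ℕ) : Int) - (j + 1)) 0))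
        (fun x => x)).getD 0 = pvBestU cuts cuts.length c := by
    intro c dp hc1 hcM hlen hmix
    conv_rhs => rw [pvBestU, if_neg (by omega : ¬ c = 0)]
    have hlist : ((PySem.List.pyRange 0 (cuts.length : Int) 1).filter
          (fun j => decide (j + 1 ≤ ((c : ℕ) : Int)))).map
          (fun j => PySem.List.pyGetD cuts j 0 + pvAGet dp (((c : ℕ) : Int) - (j + 1)) 0)
        = ((List.range cuts.length).filter (fun j => decide (j + 1 ≤ c))).map
          (fun j => cuts.getD j 0 + pvBestU cuts cuts.length (c - (j + 1))) := by
      rw [PySem.List.pyRange_one]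
      rw [show (((cuts.length : ℕ) : Int) - 0).toNat = cuts.length from by omega]
      rw [List.filter_map, List.map_map]
      have hfil : List.filter ((fun j => decide (j + 1 ≤ ((c : ℕ) : Int))) ∘ fun k : ℕ => (0 : Int) + ↑k)
          (List.range cuts.length)
          = List.filter (fun j => decide (j + 1 ≤ c)) (List.range cuts.length) := by
        apply List.filter_congr
        intro j _
        simp only [Function.comp_apply, zero_add, decide_eq_decide]
        omega
      rw [hfil]
      apply List.map_congr_left
      intro j hj
      simp only [List.mem_filter, List.mem_range, decide_eq_true_eq] at hj
      obtain ⟨hjn, hjc⟩ := hj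
      simp only [Function.comp_apply, zero_add, PySem.List.pyGetD_natCast]
      rw [show (((c : ℕ) : Int) - ((j : Int) + 1)) = (((c - (j + 1) : ℕ)) : Int) from by omega]
      rw [pvAGet_natCast, hmix (c - (j + 1)) (by omega), if_pos (by omega)]
    rw [hlist]
  obtain ⟨hlen, hval⟩ := pvFoldInv
    (F := fun c dp => (PySem.List.max? (((PySem.List.pyRange 0 (cuts.length : Int) 1).filter
        (fun j => decide (j + 1 ≤ c))).map
        (fun j => PySem.List.pyGetD cuts j 0 + pvAGet dp (c - (j + 1)) 0))
      (fun x => x)).getD 0)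
    (t := pvBestU cuts cuts.length) (s := fun _ => 0) M 1 HB
    M 1 (Array.replicate (M + 1) 0) (by omega) (by omega) (by omega) (by simp)
    (by intro k hk
        rw [show (Array.replicate (M + 1) (0 : Int)).getD k 0 = 0 from by
          simp [Array.getD_eq_getD_getElem?, hk]]
        by_cases hk0 : k < 1
        · rw [if_pos hk0, show k = 0 from by omega, pvBestU_zero]
        · rw [if_neg hk0])
  simp only [optimized_py_alt]
  rw [show (((M : ℕ) : Int) + 1).toNat = M + 1 from by omega, pvAGet_natCast]
  exact hval M (le_refl M)

-- ===== VERDICT (by name: the statement is the Claim_ definition above) =====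
theorem optimized_py_spec : Claim_equal_optimized_py := by
  intro N cuts _ hpre
  obtain ⟨hN, hne⟩ := hpre
  unfold Spec_optimized_py
  obtain ⟨M, rfl⟩ : ∃ M : ℕ, N = (M : Int) := ⟨N.toNat, (Int.toNat_of_nonneg hN).symm⟩
  have hn : 1 ≤ cuts.length := List.length_pos_iff.mpr hne
  rw [pvPortA cuts M hn, pvPortB cuts M hn, pvRowA_eq,
    show cuts.length - 1 + 1 = cuts.length from by omega]
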